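-- pv_equiv track=rewrite | github.com/mongodb/mongo | src/third_party/wiredtiger/dist/api_config.py | build_jump
-- ===== SOURCE A (Python) =====
-- def build_jump(arr):
--     assert sorted(arr) == arr
--     end = len(arr)
--     assert end < 256   # we're using a byte array currently
--     result = [-1] * 128
--     pos = 0
--     for name in arr:
--         letter = name[0]
--         i = ord(letter)
--         assert i < 128
--         if result[i] == -1:
--             result[i] = pos
--         pos += 1
--     cur = end
--     for i in range(127, -1, -1):
--         if result[i] == -1:
--             result[i] = cur
--         else:
--             cur = result[i]
--     assert cur == 0
--     return result
-- ===== SOURCE B (Python) =====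
-- def build_jump(arr):
--     # Histogram of first-letter bytes, then an exclusive prefix sum:
--     # result[i] = number of names whose first byte is < i, which for a
--     # sorted array is the first position whose first byte is >= i.
--     assert sorted(arr) == arr
--     assert len(arr) < 256
--     counts = [0] * 128
--     for name in arr:
--         i = ord(name[0])
--         assert i < 128
--         counts[i] += 1
--     result = []
--     running = 0
--     for c in counts:
--         result.append(running)
--         running += c
--     return result
-- ===== Notes on version B (the rewrite author's own statement) =====
-- stated objective: alternative
-- what changed: Replaces A's first-occurrence table plus backward fill-in sweep by a first-letter histogram followed by an exclusive prefix sum (result[i] = number of names with first byte < i).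
import Mathlib
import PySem

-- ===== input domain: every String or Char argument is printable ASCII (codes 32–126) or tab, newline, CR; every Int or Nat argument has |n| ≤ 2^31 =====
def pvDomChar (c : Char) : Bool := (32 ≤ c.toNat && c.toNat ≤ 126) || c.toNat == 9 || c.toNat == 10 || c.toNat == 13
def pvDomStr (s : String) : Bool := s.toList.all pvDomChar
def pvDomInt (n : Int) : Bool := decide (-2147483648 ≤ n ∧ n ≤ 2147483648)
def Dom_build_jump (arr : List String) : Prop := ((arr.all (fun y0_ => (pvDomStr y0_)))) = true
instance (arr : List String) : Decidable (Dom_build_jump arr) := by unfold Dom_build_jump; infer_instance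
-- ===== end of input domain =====

-- B replaces A's first-occurrence table + backward fill-in sweep by a histogram of
-- first-letter bytes followed by an exclusive prefix sum; equal results proved on sorted
-- input (objective: alternative algorithm, similar cost).

-- ===== PORT A =====
-- ord(name[0]); Pre_ guarantees name is nonempty, so the [] branch is never reached on admitted inputs
def pvFb (s : String) : Nat :=
  match s.toList with
  | [] => 0
  | c :: _ => c.toNat

-- first loop body: record position of first occurrence of each first letter
def pvStepA (st : List Int × Int) (i : Nat) : List Int × Int :=
  (if st.1.getD i 0 = -1 then st.1.set i st.2 else st.1, st.2 + 1)

-- second loop body: backward fill of the -1 slots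
def pvBackA (st : List Int × Int) (i : Nat) : List Int × Int :=
  if st.1.getD i 0 = -1 then (st.1.set i st.2, st.2) else (st.1, st.1.getD i 0)

def build_jump (arr : List String) : List Int :=
  let first := arr.foldl (fun st name => pvStepA st (pvFb name)) (List.replicate 128 (-1), 0)
  -- range(127, -1, -1) is the indices 127 down to 0
  (((List.range 128).reverse).foldl pvBackA (first.1, (arr.length : Int))).1

-- ===== PORT B =====
-- histogram loop body: counts[ord(name[0])] += 1
def pvCntB (c : List Int) (i : Nat) : List Int := c.set i (c.getD i 0 + 1)

-- prefix-sum loop body: result.append(running); running += c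
def pvPfB (st : List Int × Int) (c : Int) : List Int × Int := (st.1 ++ [st.2], st.2 + c)

def build_jump_alt (arr : List String) : List Int :=
  let counts := arr.foldl (fun c name => pvCntB c (pvFb name)) (List.replicate 128 0)
  (counts.foldl pvPfB ([], 0)).1

-- ===== PRECONDITION & SPEC =====
-- Pre_ excludes exactly the inputs on which the Python A raises: an unsorted list or one of
-- length ≥ 256 (AssertionError), or a list containing an empty name (IndexError on name[0]).
-- (Dom_ already bounds every character below 128, so 'assert i < 128' cannot fire there.)
def Pre_build_jump (arr : List String) : Prop :=
  List.Pairwise (fun a b => a.toList ≤ b.toList) arr ∧ arr.length < 256 ∧ ∀ s ∈ arr, s.toList ≠ []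

instance (arr : List String) : Decidable (Pre_build_jump arr) := by
  unfold Pre_build_jump; infer_instance

def pvWitness_build_jump : List String := ["alpha", "beta", "beta", "gamma"]

def Spec_build_jump (arr : List String) (out : List Int) : Prop := out = build_jump_alt arr
instance (arr : List String) (out : List Int) : Decidable (Spec_build_jump arr out) := by
  unfold Spec_build_jump; infer_instance

-- ===== CLAIM (what is proved, stated in full; the proofs are below) =====
def Claim_equal_build_jump : Prop := ∀ (arr : List String), Dom_build_jump arr → Pre_build_jump arr → Spec_build_jump arr (build_jump arr)

-- ===== LEMMAS AND PROOFS =====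

-- the common target: entry k is the number of names whose first byte is < k
def pvCnt (L : List Nat) (k : Nat) : Int := (L.countP (fun x => x < k) : Int)

-- getD/set bookkeeping
lemma pv_getD_set_self (l : List Int) (i : Nat) (v : Int) (h : i < l.length) :
    (l.set i v).getD i 0 = v := by
  simp [List.getD_eq_getElem?_getD, List.getElem?_set_self, h]

lemma pv_getD_set_ne (l : List Int) (i k : Nat) (v : Int) (h : i ≠ k) :
    (l.set i v).getD k 0 = l.getD k 0 := by
  simp [List.getD_eq_getElem?_getD, List.getElem?_set_ne h]

lemma pv_getD_replicate (k : Nat) (h : k < 128) :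
    (List.replicate 128 (-1 : Int)).getD k 0 = -1 := by
  rw [List.getD_eq_getElem?_getD, List.getElem?_replicate]
  simp [h]

lemma pv_list_eq_of_getD (x y : List Int) (hx : x.length = y.length)
    (h : ∀ k, k < x.length → x.getD k 0 = y.getD k 0) : x = y := by
  apply List.ext_getElem hx
  intro i h1 h2
  have := h i h1
  rwa [List.getD_eq_getElem, List.getD_eq_getElem] at this

-- counting facts
lemma pv_countP_succ (L : List Nat) (n : Nat) :
    L.countP (fun x => x < n + 1) = L.countP (fun x => x < n) + L.count n := by
  induction L with
  | nil => simp
  | cons x L ih =>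
    simp only [List.countP_cons, List.count_cons, ih]
    by_cases h1 : x < n <;> by_cases h2 : x = n <;>
      by_cases h3 : x < n + 1 <;> simp [h1, h2, h3] <;> omega

-- phase-1 of A: result[i] = index of first name with first byte i, else -1
lemma pv_phase1 (L : List Nat) : ∀ (r : List Int) (p : Int), 0 ≤ p →
    (∀ x ∈ L, x < r.length) → ∀ k : Nat,
    ((L.foldl pvStepA (r, p)).1).getD k 0 =
      if r.getD k 0 = -1 then
        (match L.findIdx? (· = k) with
         | some j => p + (j : Int)
         | none => -1)
      else r.getD k 0 := by
  induction L with
  | nil => intro r p hp hlen k; simp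
  | cons i L ih =>
    intro r p hp hlen k
    have hi : i < r.length := hlen i (by simp)
    rw [List.foldl_cons]
    by_cases hri : r.getD i 0 = -1
    · have hstep : pvStepA (r, p) i = (r.set i p, p + 1) := by
        unfold pvStepA; rw [if_pos hri]
      rw [hstep, ih (r.set i p) (p + 1) (by omega)
        (by intro x hx; have := hlen x (by simp [hx]); simpa)]
      by_cases hik : i = k
      · subst hik
        rw [pv_getD_set_self r i p hi]
        have hp' : ¬ (p = -1) := by omega
        rw [if_neg hp', if_pos hri, List.findIdx?_cons]
        simp
      · rw [pv_getD_set_ne r i k p hik, List.findIdx?_cons]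
        have hd : (decide (i = k)) = false := by simp [hik]
        rw [hd]
        simp only [Bool.false_eq_true, if_false]
        by_cases hrk : r.getD k 0 = -1
        · rw [if_pos hrk, if_pos hrk]
          cases hL : L.findIdx? (· = k) with
          | none => simp
          | some j => simp; push_cast; ring
        · rw [if_neg hrk, if_neg hrk]
    · have hstep : pvStepA (r, p) i = (r, p + 1) := by
        unfold pvStepA; rw [if_neg hri]
      rw [hstep, ih r (p + 1) (by omega)
        (by intro x hx; exact hlen x (by simp [hx]))]
      by_cases hik : i = k
      · subst hik
        rw [if_neg hri, if_neg hri]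
      · by_cases hrk : r.getD k 0 = -1
        · rw [if_pos hrk, if_pos hrk, List.findIdx?_cons]
          have hd : (decide (i = k)) = false := by simp [hik]
          rw [hd]
          simp only [Bool.false_eq_true, if_false]
          cases hL : L.findIdx? (· = k) with
          | none => simp
          | some j => simp; push_cast; ring
        · rw [if_neg hrk, if_neg hrk]

lemma pv_phase1_len (L : List Nat) : ∀ (r : List Int) (p : Int),
    ((L.foldl pvStepA (r, p)).1).length = r.length := by
  induction L with
  | nil => intro r p; rfl
  | cons i L ih =>
    intro r p
    simp only [List.foldl_cons]
    rw [ih]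
    unfold pvStepA
    split <;> simp

-- under sortedness the first index of k equals the number of elements < k
lemma pv_sorted_findIdx (L : List Nat) (hs : List.Pairwise (· ≤ ·) L) (k : Nat) :
    (match L.findIdx? (· = k) with
     | some j => (j : Int)
     | none => -1) =
    if k ∈ L then pvCnt L k else -1 := by
  induction L with
  | nil => simp
  | cons x L ih =>
    have hx : ∀ y ∈ L, x ≤ y := fun y hy => List.rel_of_pairwise_cons hs hy
    have hL : List.Pairwise (· ≤ ·) L := hs.of_cons
    by_cases hxk : x = k
    · subst hxk
      rw [List.findIdx?_cons]
      simp only [decide_true, if_true]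
      have hzero : L.countP (fun y => y < x) = 0 := by
        rw [List.countP_eq_zero]
        intro y hy
        have := hx y hy
        simp only [decide_eq_true_eq]
        omega
      simp [pvCnt, List.countP_cons, hzero]
    · rw [List.findIdx?_cons]
      have hxk' : ¬ (x = k) := hxk
      simp only [hxk', decide_false, Bool.false_eq_true, if_false]
      by_cases hk : k ∈ L
      · have hxlt : x < k := by
          have := hx k hk
          omega
        cases hfi : L.findIdx? (· = k) with
        | none =>
          rw [List.findIdx?_eq_none_iff] at hfi
          have := hfi k hk
          simp at this
        | some j =>
          have := ih hL
          rw [hfi] at this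
          simp only [hk, if_true] at this
          simp only [Option.map_some]
          have hmem : k ∈ x :: L := by simp [hk]
          simp only [hmem, if_true]
          simp [pvCnt, List.countP_cons, hxlt] at this ⊢
          push_cast
          omega
      · have hfi : L.findIdx? (· = k) = none := by
          rw [List.findIdx?_eq_none_iff]
          intro y hy
          simp
          rintro rfl
          exact hk hy
        have hmem : ¬ k ∈ x :: L := by
          intro hm
          rcases List.mem_cons.mp hm with h | h
          · exact hxk h.symm
          · exact hk h
        simp [hfi, hmem]

-- phase-2 of A: the backward sweep turns the table into pvCnt
lemma pv_phase2 (L : List Nat) :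
    ∀ (n : Nat), n ≤ 128 → ∀ (r : List Int) (cur : Int),
    r.length = 128 →
    (∀ k, k < n → r.getD k 0 = (if k ∈ L then pvCnt L k else -1)) →
    cur = pvCnt L n →
    (∀ k, n ≤ k → k < 128 → r.getD k 0 = pvCnt L k) →
    ∀ k, k < 128 →
      ((((List.range n).reverse).foldl pvBackA (r, cur)).1).getD k 0 = pvCnt L k := by
  intro n
  induction n with
  | zero =>
    intro _ r cur _ _ _ h4 k hk
    simpa using h4 k (Nat.zero_le k) hk
  | succ n ih =>
    intro hn r cur hlen h2 hcur h4 k hk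
    have hrange : (List.range (n + 1)).reverse = n :: (List.range n).reverse := by
      rw [List.range_succ, List.reverse_append]; rfl
    rw [hrange, List.foldl_cons]
    have hrn := h2 n (by omega)
    by_cases hmem : n ∈ L
    · -- r[n] = pvCnt L n ≥ 0 ≠ -1 : else-branch, cur := r[n]
      have hval : r.getD n 0 = pvCnt L n := by rw [hrn]; simp [hmem]
      have hne : ¬ r.getD n 0 = -1 := by
        rw [hval]; unfold pvCnt; omega
      have hne' : ¬ ((r, cur).1.getD n 0 = -1) := hne
      have hstep : pvBackA (r, cur) n = (r, r.getD n 0) := by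
        unfold pvBackA; rw [if_neg hne']
      rw [hstep]
      exact ih (by omega) r _ hlen (fun k hk1 => h2 k (by omega)) hval
        (fun k hk1 hk2 => by
          rcases Nat.eq_or_lt_of_le hk1 with h | h
          · rw [← h]; exact hval
          · exact h4 k (by omega) hk2) k hk
    · -- r[n] = -1 : set r[n] := cur; pvCnt L (n+1) = pvCnt L n since n ∉ L
      have hval : r.getD n 0 = -1 := by rw [hrn]; simp [hmem]
      have hval' : (r, cur).1.getD n 0 = -1 := hval
      have hstep : pvBackA (r, cur) n = (r.set n cur, cur) := by
        unfold pvBackA; rw [if_pos hval']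
      rw [hstep]
      have hcount : L.count n = 0 := by simp [List.count_eq_zero, hmem]
      have hcc : pvCnt L (n + 1) = pvCnt L n := by
        unfold pvCnt
        rw [pv_countP_succ, hcount]
        simp
      have hcur' : cur = pvCnt L n := by rw [hcur, hcc]
      refine ih (by omega) (r.set n cur) cur (by simpa using hlen)
        (fun k hk1 => ?_) hcur' (fun k hk1 hk2 => ?_) k hk
      · rw [pv_getD_set_ne r n k cur (by omega)]
        exact h2 k (by omega)
      · rcases Nat.eq_or_lt_of_le hk1 with h | h
        · rw [← h, pv_getD_set_self r n cur (by omega), hcur', h]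
        · rw [pv_getD_set_ne r n k cur (by omega)]
          exact h4 k (by omega) hk2

lemma pv_phase2_len (l : List Nat) : ∀ (r : List Int) (cur : Int),
    ((l.foldl pvBackA (r, cur)).1).length = r.length := by
  induction l with
  | nil => intro r cur; rfl
  | cons i l ih =>
    intro r cur
    simp only [List.foldl_cons]
    rw [ih]
    unfold pvBackA
    split <;> simp

-- B's histogram: counts[k] = number of names with first byte k
lemma pv_cnt_foldl (L : List Nat) : ∀ (c : List Int), (∀ x ∈ L, x < c.length) →
    ∀ k, (L.foldl pvCntB c).getD k 0 = c.getD k 0 + (L.count k : Int) := by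
  induction L with
  | nil => intro c _ k; simp
  | cons i L ih =>
    intro c hlen k
    have hi : i < c.length := hlen i (by simp)
    simp only [List.foldl_cons]
    have hlen' : ∀ x ∈ L, x < (pvCntB c i).length := by
      intro x hx
      have := hlen x (by simp [hx])
      simpa [pvCntB]
    rw [ih _ hlen' k]
    by_cases hik : i = k
    · subst hik
      rw [show (pvCntB c i).getD i 0 = c.getD i 0 + 1 from pv_getD_set_self c i _ hi]
      simp [List.count_cons]
      push_cast
      ring
    · rw [show (pvCntB c i).getD k 0 = c.getD k 0 from pv_getD_set_ne c i k _ hik]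
      simp [List.count_cons, Ne.symm hik, hik]

lemma pv_cnt_foldl_len (L : List Nat) : ∀ (c : List Int),
    (L.foldl pvCntB c).length = c.length := by
  induction L with
  | nil => intro c; rfl
  | cons i L ih => intro c; simp only [List.foldl_cons]; rw [ih]; simp [pvCntB]

-- B's prefix-sum loop produces the exclusive running sums
lemma pv_prefix_foldl : ∀ (cs : List Int) (acc : List Int) (run : Int),
    (cs.foldl pvPfB (acc, run)).1 =
      acc ++ (List.range cs.length).map (fun i => run + ((cs.take i).sum)) := by
  intro cs
  induction cs with
  | nil => intro acc run; simp
  | cons c cs ih =>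
    intro acc run
    simp only [List.foldl_cons]
    rw [show pvPfB (acc, run) c = (acc ++ [run], run + c) from rfl, ih]
    rw [List.length_cons, List.range_succ_eq_map, List.map_cons, List.map_map]
    simp only [List.take_zero, List.sum_nil, add_zero]
    rw [List.append_assoc, List.singleton_append]
    congr 2
    apply List.map_congr_left
    intro i _
    simp [List.take_succ_cons, add_assoc]

-- sum of the histogram below k = number of elements < k
lemma pv_hist_sum (L : List Nat) : ∀ (k : Nat),
    (((List.range k).map (fun j => (L.count j : Int))).sum) = pvCnt L k := by
  intro k
  induction k with
  | zero => simp [pvCnt]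
  | succ k ih =>
    rw [List.range_succ, List.map_append, List.sum_append]
    simp only [List.map_cons, List.map_nil, List.sum_cons, List.sum_nil]
    rw [ih]
    unfold pvCnt
    rw [pv_countP_succ]
    push_cast
    ring

-- first bytes of a sorted list of nonempty strings are nondecreasing
lemma pv_fb_mono (a b : String) (ha : a.toList ≠ []) (hb : b.toList ≠ [])
    (h : a.toList ≤ b.toList) : pvFb a ≤ pvFb b := by
  unfold pvFb
  cases hca : a.toList with
  | nil => exact absurd hca ha
  | cons x xs =>
    cases hcb : b.toList with
    | nil => exact absurd hcb hb
    | cons y ys =>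
      rw [hca, hcb] at h
      rcases le_iff_lt_or_eq.mp h with hlt | heq
      · have h1 : x ≤ y := List.head_le_of_lt hlt
        rw [Char.le_def] at h1
        exact UInt32.le_iff_toNat_le.mp h1
      · have : x = y := by injection heq
        rw [this]

-- main equality on the abstract first-byte list
lemma pv_main (arr : List String) (hdom : Dom_build_jump arr)
    (hpre : Pre_build_jump arr) : build_jump arr = build_jump_alt arr := by
  obtain ⟨hsort, _hlen, hne⟩ := hpre
  set L : List Nat := arr.map pvFb with hL
  -- every first byte is < 128: Dom bounds all chars ≤ 126
  have hlt : ∀ x ∈ L, x < 128 := by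
    intro x hx
    rw [hL] at hx
    obtain ⟨s, hs, rfl⟩ := List.mem_map.mp hx
    have hds : pvDomStr s = true := by
      have := List.all_eq_true.mp hdom s hs
      simpa using this
    unfold pvFb
    cases hcs : s.toList with
    | nil => exact (show (0:Nat) < 128 by omega)
    | cons c cs =>
      have hcmem : c ∈ s.toList := by rw [hcs]; simp
      have := List.all_eq_true.mp hds c hcmem
      unfold pvDomChar at this
      simp at this
      exact (show c.toNat < 128 by omega)
  -- L is nondecreasing
  have hmono : List.Pairwise (· ≤ ·) L := by
    rw [hL, List.pairwise_map]
    exact List.Pairwise.imp_of_mem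
      (fun {a b} ha hb h => pv_fb_mono a b (hne a ha) (hne b hb) h) hsort
  -- A's side
  have hfold_map : ∀ (st : List Int × Int),
      arr.foldl (fun st name => pvStepA st (pvFb name)) st = L.foldl pvStepA st := by
    intro st; rw [hL, List.foldl_map]
  have hcfold_map : ∀ (c : List Int),
      arr.foldl (fun c name => pvCntB c (pvFb name)) c = L.foldl pvCntB c := by
    intro c; rw [hL, List.foldl_map]
  have hLlen : L.length = arr.length := by rw [hL]; simp
  have hr1len : ((L.foldl pvStepA (List.replicate 128 (-1), 0)).1).length = 128 := by
    rw [pv_phase1_len]; simp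
  have hlt' : ∀ x ∈ L, x < (List.replicate 128 (-1 : Int)).length := by
    intro x hx; simpa using hlt x hx
  have hr1 : ∀ k, k < 128 →
      ((L.foldl pvStepA (List.replicate 128 (-1), 0)).1).getD k 0 =
        (if k ∈ L then pvCnt L k else -1) := by
    intro k hk
    rw [pv_phase1 L _ 0 (by omega) hlt' k, pv_getD_replicate k hk]
    simp only [if_true]
    rw [← pv_sorted_findIdx L hmono k]
    cases L.findIdx? (· = k) <;> simp
  have hcur0 : (arr.length : Int) = pvCnt L 128 := by
    unfold pvCnt
    rw [← hLlen]
    congr 1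
    symm
    rw [List.countP_eq_length]
    intro x hx
    simpa using hlt x hx
  have hA : ∀ k, k < 128 → (build_jump arr).getD k 0 = pvCnt L k := by
    intro k hk
    unfold build_jump
    simp only
    rw [hfold_map]
    exact pv_phase2 L 128 (le_refl _) _ _ hr1len hr1 hcur0
      (fun k h1 h2 => absurd h1 (by omega)) k hk
  have hAlen : (build_jump arr).length = 128 := by
    unfold build_jump
    simp only
    rw [hfold_map, pv_phase2_len, hr1len]
  -- B's side
  have hcounts : ∀ k, (L.foldl pvCntB (List.replicate 128 0)).getD k 0 =
      (if k < 128 then (L.count k : Int) else 0) := by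
    intro k
    rw [pv_cnt_foldl L _ (by intro x hx; simpa using hlt x hx) k]
    rw [List.getD_eq_getElem?_getD, List.getElem?_replicate]
    by_cases hk : k < 128
    · simp [hk]
    · have : L.count k = 0 := by
        rw [List.count_eq_zero]
        intro h
        exact hk (hlt k h)
      simp [hk, this]
  have hclen : (L.foldl pvCntB (List.replicate 128 0)).length = 128 := by
    rw [pv_cnt_foldl_len]; simp
  have hcounts_eq : L.foldl pvCntB (List.replicate 128 0) =
      (List.range 128).map (fun j => (L.count j : Int)) := by
    apply pv_list_eq_of_getD
    · rw [hclen]; simp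
    · intro k hk
      rw [hclen] at hk
      rw [hcounts k]
      simp only [hk, if_true]
      rw [List.getD_eq_getElem?_getD]
      simp [List.getElem?_map, hk, List.getElem?_range]
  have hB : build_jump_alt arr =
      (List.range 128).map (fun k => pvCnt L k) := by
    unfold build_jump_alt
    simp only
    rw [hcfold_map, pv_prefix_foldl, List.nil_append, hcounts_eq]
    simp only [List.length_map, List.length_range]
    apply List.map_congr_left
    intro k hk
    rw [List.mem_range] at hk
    rw [← List.map_take, List.take_range]
    have : min k 128 = k := by omega
    rw [this, pv_hist_sum L k]
    simp
  -- combine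
  rw [hB]
  apply pv_list_eq_of_getD
  · rw [hAlen]; simp
  · intro k hk
    rw [hAlen] at hk
    rw [hA k hk, List.getD_eq_getElem?_getD]
    simp [List.getElem?_map, hk, List.getElem?_range]

-- ===== VERDICT (by name: the statement is the Claim_ definition above) =====
theorem build_jump_spec : Claim_equal_build_jump := by
  intro arr hdom hpre
  unfold Spec_build_jump
  exact pv_main arr hdom hpre
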